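-- pv_equiv track=rewrite | github.com/B-T-D/DCS_work_backup | CH6_text_documents_and_dna/exercises_6_3/8_daffy.py | daffy
-- ===== SOURCE A (Python) =====
-- def daffy(word):
--     string = ''
--     for character in word:
--         if character.lower() == 's':
--             string += character + 'th'
--         else:
--             string += character
--     return string
-- ===== SOURCE B (Python) =====
-- def daffy(word):
--     # Two whole-string substitution passes; 'sth' contains no 'S' and 'Sth'
--     # no 's', and replace never rescans inserted text, so the passes commute.
--     return word.replace('s', 'sth').replace('S', 'Sth')
-- ===== Notes on version B (the rewrite author's own statement) =====
-- stated objective: faster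
-- what changed: Replaces the per-character loop with string accumulation by two whole-string replace passes ('s'->'sth' then 'S'->'Sth'), independent since neither replacement text contains the other pattern.
import Mathlib
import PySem

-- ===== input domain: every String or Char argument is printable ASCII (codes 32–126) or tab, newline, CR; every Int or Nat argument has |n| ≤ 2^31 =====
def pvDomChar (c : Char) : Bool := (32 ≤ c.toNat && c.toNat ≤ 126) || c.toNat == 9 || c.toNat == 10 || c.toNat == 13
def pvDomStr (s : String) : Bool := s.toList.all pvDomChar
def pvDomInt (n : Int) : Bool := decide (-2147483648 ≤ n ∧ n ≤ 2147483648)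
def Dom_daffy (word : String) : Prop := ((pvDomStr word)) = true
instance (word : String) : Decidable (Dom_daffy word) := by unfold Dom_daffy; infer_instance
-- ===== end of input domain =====

-- B replaces A's per-character accumulation loop by two whole-string replace passes (idiomatic).

-- ===== PORT A =====
-- per-character loop over word: append c ++ "th" when c.lower() == 's', else append c
def daffy (word : String) : String :=
  String.ofList (word.toList.foldl
    (fun acc c =>
      if PySem.Chars.lowerChar c == 's' then acc ++ (c :: "th".toList) else acc ++ [c])
    [])

-- ===== PORT B =====
def daffy_alt (word : String) : String :=
  PySem.Str.replace (PySem.Str.replace word "s" "sth") "S" "Sth"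

-- ===== PRECONDITION & SPEC =====
def Spec_daffy (word : String) (out : String) : Prop := out = daffy_alt word
instance (word : String) (out : String) : Decidable (Spec_daffy word out) := by unfold Spec_daffy; infer_instance

-- ===== CLAIM (what is proved, stated in full; the proofs are below) =====
def Claim_equal_daffy : Prop := ∀ (word : String), Dom_daffy word → Spec_daffy word (daffy word)

-- ===== LEMMAS AND PROOFS =====

-- replace with a single-character pattern is a flatMap over the characters
theorem replace_go_single (a : Char) (r : List Char) :
    ∀ (s : List Char) (fuel : Nat) (acc : List Char), s.length ≤ fuel →
      PySem.Chars.replace.go [a] r fuel s acc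
        = acc.reverse ++ s.flatMap (fun c => if c == a then r else [c]) := by
  intro s
  induction s with
  | nil =>
      intro fuel acc _
      unfold PySem.Chars.replace.go
      cases fuel <;> simp
  | cons c t ih =>
      intro fuel acc hf
      cases fuel with
      | zero => simp at hf
      | succ n =>
        have ht : t.length ≤ n := by simpa using hf
        unfold PySem.Chars.replace.go
        by_cases h : a = c
        · subst h
          rw [if_pos (by simp [List.isPrefixOf])]
          rw [show List.drop [a].length (a :: t) = t from rfl]
          rw [ih n (r.reverse ++ acc) ht]
          simp [List.flatMap_cons]
        · have h1 : (a == c) = false := beq_eq_false_iff_ne.mpr h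
          have h2 : ¬ (c = a) := Ne.symm h
          rw [if_neg (by simp [List.isPrefixOf, h1])]
          rw [ih n (c :: acc) ht]
          simp [List.flatMap_cons, h2]

theorem replace_single (a : Char) (r : List Char) (s : List Char) :
    PySem.Chars.replace s [a] r = s.flatMap (fun c => if c == a then r else [c]) := by
  unfold PySem.Chars.replace
  rw [if_neg (by simp)]
  simpa using replace_go_single a r s s.length [] le_rfl

theorem lowerChar_eq_s (c : Char) :
    (PySem.Chars.lowerChar c == 's') = (c == 's' || c == 'S') := by
  unfold PySem.Chars.lowerChar PySem.Chars.isupper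
  by_cases h : 'A' ≤ c ∧ c ≤ 'Z'
  · have h1n : 65 ≤ c.toNat := h.1
    have h2n : c.toNat ≤ 90 := h.2
    rw [if_pos (by simp [h.1, h.2])]
    have hv : (c.toNat + 32).isValidChar := by constructor; omega
    have hn : (Char.ofNat (c.toNat + 32)).toNat = c.toNat + 32 := by
      unfold Char.ofNat
      rw [dif_pos hv]
      exact Char.toNat_ofNatAux hv
    by_cases hS : c = 'S'
    · subst hS; decide
    · have hns : Char.ofNat (c.toNat + 32) ≠ 's' := by
        intro he
        have h115 : (Char.ofNat (c.toNat + 32)).toNat = 115 := by rw [he]; rfl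
        have hc83 : c.toNat = 83 := by omega
        have := Char.ofNat_toNat c
        rw [hc83] at this
        exact hS this.symm
      have hcs : c ≠ 's' := by
        intro he; subst he; exact absurd h2n (by decide)
      simp [beq_eq_false_iff_ne.mpr hns, beq_eq_false_iff_ne.mpr hcs,
            beq_eq_false_iff_ne.mpr hS]
  · rw [if_neg (by simpa using fun h1 h2 => h ⟨h1, h2⟩)]
    have hS : c ≠ 'S' := by
      intro he; subst he; exact h ⟨by decide, by decide⟩
    simp [beq_eq_false_iff_ne.mpr hS]

theorem foldl_flat (f : Char → List Char) :
    ∀ (s : List Char) (acc : List Char),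
      s.foldl (fun acc c => acc ++ f c) acc = acc ++ s.flatMap f := by
  intro s
  induction s with
  | nil => simp
  | cons c t ih => intro acc; simp [List.foldl_cons, ih, List.flatMap_cons]

-- ===== VERDICT (by name: the statement is the Claim_ definition above) =====
theorem daffy_spec : Claim_equal_daffy := by
  intro word _
  unfold Spec_daffy daffy daffy_alt
  apply String.toList_inj.mp
  simp only [PySem.Str.toList_replace]
  rw [show "s".toList = ['s'] from rfl, show "S".toList = ['S'] from rfl]
  rw [replace_single, replace_single]
  rw [show ((fun acc c =>
      if PySem.Chars.lowerChar c == 's' then acc ++ (c :: "th".toList) else acc ++ [c])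
      = fun (acc : List Char) c => acc ++ (if PySem.Chars.lowerChar c == 's'
          then (c :: "th".toList) else [c])) from by
    funext acc c; by_cases h : PySem.Chars.lowerChar c == 's' <;> simp [h]]
  rw [foldl_flat]
  rw [List.flatMap_assoc]
  simp only [List.nil_append, String.toList_ofList]
  congr 1
  funext c
  rw [lowerChar_eq_s]
  by_cases hs : c = 's'
  · subst hs; decide
  · by_cases hS : c = 'S'
    · subst hS; decide
    · simp [beq_eq_false_iff_ne.mpr hs, beq_eq_false_iff_ne.mpr hS, hS]
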